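-- pv_equiv track=rewrite | github.com/miliar/Code_Jam_Webscraper | solutions_python/Problem_138/782.py | play_war
-- ===== SOURCE A (Python) =====
-- def best_weight_K_war(opts):
--     sK = opts['sK']
--     n = opts['bN']
--     for wK in sK:
--         if wK > n:
--             sK.remove(wK)
--             return wK
--     wK = sK[-1]
--     sK.remove(wK)
--     return wK
--
-- def best_weight_N_war(opts):
--     sN = opts['sN']
--     wN = sN[0]
--     sN.remove(wN)
--     return wN
--
-- def play_war(no_of_weights, N, K):
--     pn = 0
--     pk = 0
--     from copy import deepcopy
--
--     sN = list(deepcopy(N))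
--     sK = list(deepcopy(K))
--
--     sN.sort()
--     sK.sort()
--
--     while no_of_weights != 0:
--         bN = best_weight_N_war({'sN': sN})
--         bK = best_weight_K_war({'bN': bN, 'sK': sK})
--
--         if bK > bN:
--             pk += 1
--         else:
--             pn += 1
--         no_of_weights -= 1
--     return pn
-- ===== SOURCE B (Python) =====
-- def play_war(no_of_weights, N, K):
--     # Two-pointer greedy: O(n log n) instead of A's quadratic remove/rescan loop.
--     sN = sorted(N)
--     sK = sorted(K)
--     j = 0
--     wins_k = 0
--     for i in range(no_of_weights):
--         n = sN[i]
--         while j < len(sK) and sK[j] <= n: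
--             j += 1
--         if j < len(sK):
--             wins_k += 1
--             j += 1
--     return no_of_weights - wins_k
-- ===== Notes on version B (the rewrite author's own statement) =====
-- stated objective: faster
-- what changed: A replays the game round by round, rescanning and removing from the K list each round (list.remove and a linear find per round); B sorts once and runs a single two-pointer sweep over the first no_of_weights sorted N values against sorted K, counting K's greedy wins.
import Mathlib
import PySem

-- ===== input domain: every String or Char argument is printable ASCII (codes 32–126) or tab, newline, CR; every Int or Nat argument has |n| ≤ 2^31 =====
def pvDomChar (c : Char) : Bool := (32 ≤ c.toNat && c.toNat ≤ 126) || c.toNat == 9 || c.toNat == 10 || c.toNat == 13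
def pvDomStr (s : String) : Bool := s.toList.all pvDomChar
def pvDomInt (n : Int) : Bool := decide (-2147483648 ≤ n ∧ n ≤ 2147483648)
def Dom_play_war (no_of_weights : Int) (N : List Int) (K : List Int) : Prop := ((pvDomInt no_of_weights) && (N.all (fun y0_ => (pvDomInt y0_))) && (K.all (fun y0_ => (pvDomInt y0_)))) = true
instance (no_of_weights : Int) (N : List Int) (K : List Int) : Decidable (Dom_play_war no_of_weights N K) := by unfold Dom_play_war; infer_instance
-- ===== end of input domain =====

-- B replaces A's quadratic remove/rescan round loop by a sorted two-pointer greedy (objective: faster).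

-- ===== PORT A =====
-- the 'for wK in sK: if wK > n: …' scan of best_weight_K_war
def pwFindGT (n : Int) : List Int → Option Int
  | [] => none
  | x :: xs => if x > n then some x else pwFindGT n xs

-- best_weight_K_war: returns (wK, sK after sK.remove(wK)); Python raises IndexError on empty sK
-- (outside Pre_, where the port returns the dummy (0, sK)); the removed wK is always a member, so .getD is never taken.
def pwBestK (n : Int) (sK : List Int) : Int × List Int :=
  match pwFindGT n sK with
  | some wK => (wK, (PySem.List.remove? sK wK).getD sK)
  | none =>
    match PySem.List.pyGet? sK (-1) with
    | some wK => (wK, (PySem.List.remove? sK wK).getD sK)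
    | none => (0, sK)

-- best_weight_N_war: wN = sN[0]; sN.remove(wN); IndexError on empty sN is outside Pre_.
def pwBestN (sN : List Int) : Int × List Int :=
  match PySem.List.pyGet? sN 0 with
  | some wN => (wN, (PySem.List.remove? sN wN).getD sN)
  | none => (0, sN)

-- the 'while no_of_weights != 0' loop; the counter is a Nat (Python diverges/raises for a
-- negative counter, which Pre_ excludes); pk is carried exactly as in A though never returned.
def pwLoop : Nat → List Int → List Int → Int → Int → Int
  | 0, _, _, pn, _ => pn
  | fuel + 1, sN, sK, pn, pk =>
    let r1 := pwBestN sN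
    let r2 := pwBestK r1.1 sK
    if r2.1 > r1.1 then pwLoop fuel r1.2 r2.2 pn (pk + 1)
    else pwLoop fuel r1.2 r2.2 (pn + 1) pk

def play_war (no_of_weights : Int) (N : List Int) (K : List Int) : Int :=
  pwLoop no_of_weights.toNat
    (PySem.List.sorted N (fun x => x) false)
    (PySem.List.sorted K (fun x => x) false) 0 0

-- ===== PORT B =====
-- the inner 'while j < len(sK) and sK[j] <= n: j += 1'; fuel = sK.length - j makes it structural
def altSkipAux (sK : List Int) (n : Int) : Nat → Nat → Nat
  | 0, j => j
  | fuel + 1, j =>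
    if h : j < sK.length then
      if sK[j] ≤ n then altSkipAux sK n fuel (j + 1) else j
    else j

def altSkip (sK : List Int) (n : Int) (j : Nat) : Nat := altSkipAux sK n (sK.length - j) j

-- the 'for i in range(no_of_weights)' loop of B, carrying the pointer j and wins_k;
-- sN[i] is pyGet? (none = IndexError, which Pre_ excludes; the port then returns the count so far)
def altLoop (sN sK : List Int) : List Int → Nat → Int → Int
  | [], _, wins => wins
  | i :: is, j, wins =>
    match PySem.List.pyGet? sN i with
    | none => wins
    | some n =>
      let j' := altSkip sK n j
      if j' < sK.length then altLoop sN sK is (j' + 1) (wins + 1)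
      else altLoop sN sK is j' wins

def play_war_alt (no_of_weights : Int) (N : List Int) (K : List Int) : Int :=
  let sN := PySem.List.sorted N (fun x => x) false
  let sK := PySem.List.sorted K (fun x => x) false
  no_of_weights - altLoop sN sK (PySem.List.pyRange 0 no_of_weights 1) 0 0

-- ===== PRECONDITION & SPEC =====
-- A raises IndexError (after exhausting a list) unless 0 ≤ no_of_weights ≤ len(N) and ≤ len(K):
-- each round pops one element from each list.  Pre_ is exactly A's returning set.
def Pre_play_war (no_of_weights : Int) (N : List Int) (K : List Int) : Prop :=
  0 ≤ no_of_weights ∧ no_of_weights ≤ (N.length : Int) ∧ no_of_weights ≤ (K.length : Int)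
instance (no_of_weights : Int) (N : List Int) (K : List Int) : Decidable (Pre_play_war no_of_weights N K) := by unfold Pre_play_war; infer_instance

def pvWitness_play_war : Int × List Int × List Int := (2, [3, 1, 5], [2, 4])

def Spec_play_war (no_of_weights : Int) (N : List Int) (K : List Int) (out : Int) : Prop := out = play_war_alt no_of_weights N K
instance (no_of_weights : Int) (N : List Int) (K : List Int) (out : Int) : Decidable (Spec_play_war no_of_weights N K out) := by unfold Spec_play_war; infer_instance

-- ===== CLAIM (what is proved, stated in full; the proofs are below) =====
def Claim_equal_play_war : Prop := ∀ (no_of_weights : Int) (N : List Int) (K : List Int), Dom_play_war no_of_weights N K → Pre_play_war no_of_weights N K → Spec_play_war no_of_weights N K (play_war no_of_weights N K)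

-- ===== LEMMAS AND PROOFS =====

-- proof-side list-walking version of B's loop (altLoop over in-range indices walks this list)
def altLoopL (sK : List Int) : List Int → Nat → Int → Int
  | [], _, wins => wins
  | n :: rest, j, wins =>
    let j' := altSkip sK n j
    if j' < sK.length then altLoopL sK rest (j' + 1) (wins + 1)
    else altLoopL sK rest j' wins

lemma pwBestN_cons (n : Int) (rest : List Int) : pwBestN (n :: rest) = (n, rest) := by
  simp [pwBestN, PySem.List.pyGet?, PySem.List.pyIdx?]

lemma pwFindGT_none (n : Int) (l : List Int) (h : ∀ x ∈ l, x ≤ n) : pwFindGT n l = none := by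
  induction l with
  | nil => rfl
  | cons x xs ih =>
    have hx := h x (List.mem_cons_self ..)
    simp [pwFindGT, not_lt.mpr hx]
    exact ih fun y hy => h y (List.mem_cons_of_mem _ hy)

lemma pwFindGT_prefix (n : Int) (P rest : List Int) (h : ∀ x ∈ P, x ≤ n) :
    pwFindGT n (P ++ rest) = pwFindGT n rest := by
  induction P with
  | nil => rfl
  | cons x xs ih =>
    have hx := h x (List.mem_cons_self ..)
    simp [pwFindGT, not_lt.mpr hx]
    exact ih fun y hy => h y (List.mem_cons_of_mem _ hy)

lemma remove_of_prefix (P Q : List Int) (r : Int) (h : r ∉ P) :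
    PySem.List.remove? (P ++ r :: Q) r = some (P ++ Q) := by
  induction P with
  | nil => simp [PySem.List.remove?_cons_self]
  | cons x xs ih =>
    have hx : x ≠ r := fun e => h (e ▸ List.mem_cons_self ..)
    rw [List.cons_append, PySem.List.remove?_cons_of_ne _ hx,
      ih fun hy => h (List.mem_cons_of_mem _ hy)]
    simp

lemma dropWhile_head_false (p : Int → Bool) :
    ∀ (l : List Int) (r : Int) (R' : List Int), l.dropWhile p = r :: R' → p r = false := by
  intro l
  induction l with
  | nil => intro r R' h; simp at h
  | cons x xs ih =>
    intro r R' h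
    by_cases hx : p x
    · rw [List.dropWhile_cons_of_pos hx] at h
      exact ih r R' h
    · rw [List.dropWhile_cons_of_neg hx] at h
      cases h
      simpa using hx

lemma altSkipAux_eq (sK : List Int) (n : Int) :
    ∀ fuel j, sK.length ≤ j + fuel → j ≤ sK.length →
      altSkipAux sK n fuel j = j + ((sK.drop j).takeWhile (fun x => decide (x ≤ n))).length := by
  intro fuel
  induction fuel with
  | zero =>
    intro j h1 h2
    have : j = sK.length := by omega
    simp [altSkipAux, this, List.drop_length]
  | succ fuel ih =>
    intro j h1 h2
    by_cases hj : j < sK.length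
    · have hD : sK.drop j = sK[j] :: sK.drop (j + 1) := List.drop_eq_getElem_cons hj
      by_cases hle : sK[j] ≤ n
      · have hTW : (sK.drop j).takeWhile (fun x => decide (x ≤ n))
            = sK[j] :: (sK.drop (j + 1)).takeWhile (fun x => decide (x ≤ n)) := by
          rw [hD, List.takeWhile_cons_of_pos (by simpa using hle)]
        rw [altSkipAux, dif_pos hj, if_pos hle, ih (j + 1) (by omega) (by omega), hTW]
        simp; omega
      · have hTW : (sK.drop j).takeWhile (fun x => decide (x ≤ n)) = [] := by
          rw [hD, List.takeWhile_cons_of_neg (by simpa using hle)]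
        rw [altSkipAux, dif_pos hj, if_neg hle, hTW]
        simp
    · have hjl : j = sK.length := by omega
      simp [altSkipAux, hjl, List.drop_length]

lemma altSkip_eq (sK : List Int) (n : Int) (j : Nat) (hj : j ≤ sK.length) :
    altSkip sK n j = j + ((sK.drop j).takeWhile (fun x => decide (x ≤ n))).length :=
  altSkipAux_eq sK n (sK.length - j) j (by omega) hj

lemma altLoopL_stuck (sK : List Int) :
    ∀ (L : List Int) (j : Nat) (w : Int), sK.length ≤ j → altLoopL sK L j w = w := by
  intro L
  induction L with
  | nil => intro j w _; rfl
  | cons n rest ih =>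
    intro j w hj
    have hs : altSkip sK n j = j := by
      simp [altSkip, Nat.sub_eq_zero_of_le hj, altSkipAux]
    simp [altLoopL, hs, Nat.not_lt.mpr hj, ih j w hj]

lemma altLoopL_acc (sK : List Int) :
    ∀ (L : List Int) (j : Nat) (w : Int), altLoopL sK L j w = altLoopL sK L j 0 + w := by
  intro L
  induction L with
  | nil => intro j w; simp [altLoopL]
  | cons n rest ih =>
    intro j w
    simp only [altLoopL]
    split
    · have h1 := ih (altSkip sK n j + 1) (w + 1)
      have h2 := ih (altSkip sK n j + 1) (0 + 1)
      omega
    · have h1 := ih (altSkip sK n j) w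
      omega

lemma pwLoop_loseAll :
    ∀ (L sK : List Int) (pn pk : Int), L.length ≤ sK.length →
      (∀ x ∈ sK, ∀ m ∈ L, x ≤ m) →
      pwLoop L.length L sK pn pk = pn + (L.length : Int) := by
  intro L
  induction L with
  | nil => intro sK pn pk _ _; simp [pwLoop]
  | cons n rest ih =>
    intro sK pn pk hlen hle
    have hne : sK ≠ [] := by
      intro h; subst h; simp at hlen
    obtain ⟨ℓ, hℓ⟩ := List.getLast?_isSome.mpr hne |> Option.isSome_iff_exists.mp
    have hmem : ℓ ∈ sK := List.mem_of_getLast? hℓ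
    have hℓle : ℓ ≤ n := hle ℓ hmem n (List.mem_cons_self ..)
    have hfind : pwFindGT n sK = none :=
      pwFindGT_none n sK fun x hx => hle x hx n (List.mem_cons_self ..)
    have hget : PySem.List.pyGet? sK (-1) = some ℓ := by
      rw [PySem.List.pyGet?_neg_one]; exact hℓ
    have hrem : PySem.List.remove? sK ℓ = some (sK.erase ℓ) :=
      PySem.List.remove?_eq_some_erase _ _ hmem
    have hbk : pwBestK n sK = (ℓ, sK.erase ℓ) := by
      simp [pwBestK, hfind, hget, hrem]
    have hstep : pwLoop (n :: rest).length (n :: rest) sK pn pk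
        = pwLoop rest.length rest (sK.erase ℓ) (pn + 1) pk := by
      simp only [List.length_cons, pwLoop, pwBestN_cons, hbk, if_neg (not_lt.mpr hℓle)]
    rw [hstep, ih (sK.erase ℓ) (pn + 1) pk]
    · simp only [List.length_cons]
      push_cast
      ring
    · have := List.length_erase_of_mem hmem
      simp at hlen ⊢; omega
    · intro x hx m hm
      exact hle x (List.mem_of_mem_erase hx) m (List.mem_cons_of_mem _ hm)

lemma pwLoop_eq_alt (sK₀ : List Int) :
    ∀ (L : List Int) (S : List Int) (j : Nat) (pn pk : Int),
      L.Pairwise (· ≤ ·) →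
      (∀ s ∈ S, ∀ m ∈ L, s ≤ m) →
      j ≤ sK₀.length →
      L.length ≤ S.length + (sK₀.drop j).length →
      pwLoop L.length L (S ++ sK₀.drop j) pn pk
        = pn + (L.length : Int) - altLoopL sK₀ L j 0 := by
  intro L
  induction L with
  | nil => intro S j pn pk _ _ _ _; simp [pwLoop, altLoopL]
  | cons n rest ih =>
    intro S j pn pk hL hS hj hlen
    have hLn : ∀ m ∈ rest, n ≤ m := (List.pairwise_cons.mp hL).1
    have hLrest : rest.Pairwise (· ≤ ·) := (List.pairwise_cons.mp hL).2
    have hSn : ∀ s ∈ S, s ≤ n := fun s hs => hS s hs n (List.mem_cons_self ..)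
    set D := sK₀.drop j with hDdef
    set T := D.takeWhile (fun x => decide (x ≤ n)) with hTdef
    set R := D.dropWhile (fun x => decide (x ≤ n)) with hRdef
    have hTR : T ++ R = D := List.takeWhile_append_dropWhile
    have hTle : ∀ x ∈ T, x ≤ n := by
      intro x hx
      have := List.mem_takeWhile_imp hx
      simpa using this
    have hskip : altSkip sK₀ n j = j + T.length := altSkip_eq sK₀ n j hj
    match hR : R with
    | r :: R' =>
      -- win round for K
      have hDW : D.dropWhile (fun x => decide (x ≤ n)) = r :: R' := hRdef.symm
      have hrn : n < r := by
        have h := dropWhile_head_false (fun x => decide (x ≤ n)) D r R' hDW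
        simpa using h
      have hdropT : sK₀.drop (j + T.length) = r :: R' := by
        rw [← List.drop_drop, ← hDdef, ← hTR, List.drop_left]
      have hlt : j + T.length < sK₀.length := by
        have := congrArg List.length hdropT
        simp at this
        omega
      have hdropT1 : sK₀.drop (j + T.length + 1) = R' := by
        rw [← List.drop_drop (i := 1), hdropT]; rfl
      have hfind : pwFindGT n (S ++ D) = some r := by
        rw [← hTR, ← List.append_assoc,
          pwFindGT_prefix n (S ++ T) _ (by
            intro x hx
            rcases List.mem_append.mp hx with h | h
            · exact hSn x h
            · exact hTle x h)]
        simp [pwFindGT, hrn]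
      have hrem : PySem.List.remove? (S ++ D) r = some ((S ++ T) ++ R') := by
        rw [← hTR, ← List.append_assoc]
        apply remove_of_prefix
        intro hr
        rcases List.mem_append.mp hr with h | h
        · exact absurd (hSn r h) (not_le.mpr hrn)
        · exact absurd (hTle r h) (not_le.mpr hrn)
      have hbk : pwBestK n (S ++ D) = (r, (S ++ T) ++ R') := by
        simp [pwBestK, hfind, hrem]
      have hstep : pwLoop (n :: rest).length (n :: rest) (S ++ D) pn pk
          = pwLoop rest.length rest ((S ++ T) ++ R') pn (pk + 1) := by
        simp only [List.length_cons, pwLoop, pwBestN_cons, hbk, if_pos hrn]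
      have hihyp := ih (S ++ T) (j + T.length + 1) pn (pk + 1) hLrest
        (by
          intro s hs m hm
          rcases List.mem_append.mp hs with h | h
          · exact hS s h m (List.mem_cons_of_mem _ hm)
          · exact le_trans (hTle s h) (hLn m hm))
        (by omega)
        (by
          rw [hdropT1]
          have h1 : D.length = T.length + (R'.length + 1) := by
            rw [← hTR]; simp
          simp only [List.length_cons, List.length_append] at hlen ⊢
          omega)
      rw [hdropT1] at hihyp
      have halt : altLoopL sK₀ (n :: rest) j 0
          = altLoopL sK₀ rest (j + T.length + 1) 0 + 1 := by
        simp only [altLoopL, hskip, if_pos hlt]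
        rw [altLoopL_acc]
        omega
      rw [hstep, hihyp, halt]
      simp only [List.length_cons]
      push_cast
      omega
    | [] =>
      -- from this round on, K always loses
      have hTD : T = D := by rw [← hTR]; simp
      have hDle : ∀ x ∈ D, x ≤ n := fun x hx => hTle x (hTD ▸ hx)
      have hDlen : D.length = sK₀.length - j := by simp [hDdef]
      have hskip' : altSkip sK₀ n j = sK₀.length := by rw [hskip, hTD]; omega
      have hA : pwLoop (n :: rest).length (n :: rest) (S ++ D) pn pk
          = pn + ((n :: rest).length : Int) := by
        apply pwLoop_loseAll
        · simpa using hlen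
        · intro x hx m hm
          have hxn : x ≤ n := by
            rcases List.mem_append.mp hx with h | h
            · exact hSn x h
            · exact hDle x h
          rcases List.mem_cons.mp hm with h | h
          · exact h ▸ hxn
          · exact le_trans hxn (hLn m h)
      have hB : altLoopL sK₀ (n :: rest) j 0 = 0 := by
        simp only [altLoopL, hskip', lt_irrefl, if_false]
        exact altLoopL_stuck sK₀ rest sK₀.length 0 le_rfl
      rw [hA, hB]
      omega

lemma pwLoop_take :
    ∀ (fuel : Nat) (sN sK : List Int) (pn pk : Int), fuel ≤ sN.length →
      pwLoop fuel sN sK pn pk = pwLoop fuel (sN.take fuel) sK pn pk := by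
  intro fuel
  induction fuel with
  | zero => intro sN sK pn pk _; rfl
  | succ fuel ih =>
    intro sN sK pn pk h
    match sN with
    | [] => simp at h
    | n :: rest =>
      simp only [List.take_succ_cons, pwLoop, pwBestN_cons]
      split
      · exact ih rest _ pn (pk + 1) (by simpa using h)
      · exact ih rest _ (pn + 1) pk (by simpa using h)

lemma altLoop_eq_list (sN sK : List Int) :
    ∀ (d : Nat) (a : Int) (j : Nat) (w : Int), 0 ≤ a → a.toNat + d ≤ sN.length →
      altLoop sN sK (PySem.List.pyRange a (a + d) 1) j w
        = altLoopL sK ((sN.drop a.toNat).take d) j w := by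
  intro d
  induction d with
  | zero =>
    intro a j w _ _
    simp [PySem.List.pyRange, altLoop, altLoopL]
  | succ d ih =>
    intro a j w ha hlen
    have hilt : a < (sN.length : Int) := by omega
    have hcons : PySem.List.pyRange a (a + (d + 1 : Nat)) 1
        = a :: PySem.List.pyRange (a + 1) (a + (d + 1 : Nat)) 1 :=
      PySem.List.pyRange_one_cons (by omega)
    have hget : PySem.List.pyGet? sN a = some sN[a.toNat] :=
      PySem.List.pyGet?_eq_some_getElem sN ha hilt
    have hnlt : a.toNat < sN.length := by omega
    have htake : (sN.drop a.toNat).take (d + 1)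
        = sN[a.toNat] :: (sN.drop (a.toNat + 1)).take d := by
      rw [List.drop_eq_getElem_cons hnlt, List.take_succ_cons]
    have hrange : a + ((d : Int) + 1) = (a + 1) + (d : Int) := by ring
    have hih := fun (j' : Nat) (w' : Int) => ih (a + 1) j' w' (by omega) (by omega)
    have htoNat : (a + 1).toNat = a.toNat + 1 := by omega
    simp only [htoNat] at hih
    simp only [altLoop, hcons, hget, htake, altLoopL]
    push_cast
    rw [hrange]
    push_cast at hih
    split
    · exact hih _ _
    · exact hih _ _

-- ===== VERDICT (by name: the statement is the Claim_ definition above) =====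
theorem play_war_spec : Claim_equal_play_war := by
  intro m N K _ hpre
  obtain ⟨hm0, hmN, hmK⟩ := hpre
  unfold Spec_play_war play_war play_war_alt
  set sN := PySem.List.sorted N (fun x => x) false with hsN
  set sK₀ := PySem.List.sorted K (fun x => x) false with hsK
  have hlenN : sN.length = N.length := PySem.List.length_sorted ..
  have hlenK : sK₀.length = K.length := PySem.List.length_sorted ..
  have hfuel : m.toNat ≤ sN.length := by rw [hlenN]; omega
  rw [pwLoop_take m.toNat sN sK₀ 0 0 hfuel]
  have hlenTake : (sN.take m.toNat).length = m.toNat := by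
    simp [hfuel]
  have hpw : (sN.take m.toNat).Pairwise (· ≤ ·) := by
    have h := PySem.List.sorted_pairwise N (fun x => x)
    exact List.Pairwise.sublist (List.take_sublist ..) h
  have hmain := pwLoop_eq_alt sK₀ (sN.take m.toNat) [] 0 0 0 hpw
    (by intro s hs; simp at hs)
    (Nat.zero_le _)
    (by simp [hlenTake, hlenK]; omega)
  have hbridge := altLoop_eq_list sN sK₀ m.toNat 0 0 0 le_rfl (by simpa using hfuel)
  simp only [Int.toNat_zero, List.drop_zero, zero_add, Int.toNat_of_nonneg hm0] at hbridge
  simp only [List.nil_append, List.drop_zero, hlenTake] at hmain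
  simp only [hmain, hbridge, Int.toNat_of_nonneg hm0]
  omega
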